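-- pv_equiv track=rewrite | github.com/ShuvalovAnthony/ez_python | Mihail/9/12098/12098.py | check
-- ===== SOURCE A (Python) =====
-- def check(row: list):
--     povtor = []
--     uniq = []
--
--     for num in row:
--         if row.count(num) == 3:
--             povtor.append(num)
--         if row.count(num) == 1:
--             uniq.append(num)
--
--
--     return (
--         (len(povtor) == 3) and
--         (povtor[0]%2 == 1) and
--         (uniq[0]%2 == 0)
--     )
-- ===== SOURCE B (Python) =====
-- def check(row: list):
--     s = sorted(row)
--     triples = []
--     singles = set()
--     i = 0
--     n = len(s)
--     while i < n:
--         j = i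
--         while j < n and s[j] == s[i]:
--             j += 1
--         if j - i == 3:
--             triples.append(s[i])
--         elif j - i == 1:
--             singles.add(s[i])
--         i = j
--     if len(triples) != 1 or triples[0] % 2 != 1:
--         return False
--     first_single = next(x for x in row if x in singles)
--     return first_single % 2 == 0
-- ===== Notes on version B (the rewrite author's own statement) =====
-- stated objective: faster
-- what changed: Replaces A's per-element row.count scans and duplicate-filled povtor/uniq lists with sort-then-run-length-scan: B sorts the row, walks maximal runs of equal values to collect the triple values and the set of unique values, then takes the first row element in that set.
import Mathlib
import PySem

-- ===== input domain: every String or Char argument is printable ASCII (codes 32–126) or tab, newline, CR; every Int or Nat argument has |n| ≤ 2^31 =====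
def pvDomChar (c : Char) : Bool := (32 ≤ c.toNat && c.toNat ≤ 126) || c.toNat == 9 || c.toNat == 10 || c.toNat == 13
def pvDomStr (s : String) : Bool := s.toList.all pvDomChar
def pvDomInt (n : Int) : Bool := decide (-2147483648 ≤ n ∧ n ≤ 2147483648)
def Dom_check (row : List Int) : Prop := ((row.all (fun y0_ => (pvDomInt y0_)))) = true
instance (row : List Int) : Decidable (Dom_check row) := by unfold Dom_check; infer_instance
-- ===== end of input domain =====

-- B replaces A's quadratic per-element row.count scans by sort + one run-length scan
-- over the sorted copy (collecting the triple values and the set of unique values),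
-- then takes the first row element that is a unique value: faster.

-- ===== PORT A =====
-- the loop keeps the pair (povtor, uniq); povtor[0]/uniq[0] are pyGet? at 0 (uniq[0]'s
-- IndexError case is excluded by Pre_check below)
def check (row : List Int) : Bool :=
  let res := row.foldl
    (fun (st : List Int × List Int) num =>
      ((if PySem.List.count row num == 3 then st.1 ++ [num] else st.1),
       (if PySem.List.count row num == 1 then st.2 ++ [num] else st.2)))
    (([] : List Int), ([] : List Int))
  (res.1.length == 3) &&
  (PySem.Int.mod ((PySem.List.pyGet? res.1 0).getD 0) 2 == 1) &&
  (PySem.Int.mod ((PySem.List.pyGet? res.2 0).getD 0) 2 == 0)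

-- ===== PORT B =====
-- the outer while loop of Source B over the runs of the sorted copy: each step consumes one
-- maximal run s[i:j] (takeWhile/dropWhile) and classifies it by its length (if/elif)
def scanRuns : List Int → List Int × List Int
  | [] => ([], [])
  | a :: t =>
    let grp := t.takeWhile (fun x => x == a)
    let p := scanRuns (t.dropWhile (fun x => x == a))
    if grp.length + 1 == 3 then (a :: p.1, p.2)
    else if grp.length + 1 == 1 then (p.1, a :: p.2)
    else p
termination_by l => l.length
decreasing_by simpa using Nat.lt_succ_of_le (List.length_dropWhile_le (fun x => x == a) t)

-- next(x for x in row if x in singles) is row.find?; the 'none' branch is Python's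
-- StopIteration, excluded by Pre_check below
def check_alt (row : List Int) : Bool :=
  let s := PySem.List.sorted row (fun x => x) false
  let p := scanRuns s
  if !(p.1.length == 1) || !(PySem.Int.mod (p.1.headD 0) 2 == 1) then false
  else
    match row.find? (fun x => p.2.contains x) with
    | some x => PySem.Int.mod x 2 == 0
    | none => false

-- ===== PRECONDITION & SPEC =====
-- Pre_check excludes exactly the rows where Python A raises IndexError (and Python B
-- raises StopIteration): exactly one odd value occurring three times, no value occurring once.
def Pre_check (row : List Int) : Prop :=
  ¬ ((row.filter (fun n => PySem.List.count row n == 3)).length = 3 ∧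
     PySem.Int.mod ((row.filter (fun n => PySem.List.count row n == 3)).headD 0) 2 = 1 ∧
     row.all (fun n => PySem.List.count row n != 1) = true)
instance (row : List Int) : Decidable (Pre_check row) := by unfold Pre_check; infer_instance

def pvWitness_check : List Int := [1, 1, 1, 2]

def Spec_check (row : List Int) (out : Bool) : Prop := out = check_alt row
instance (row : List Int) (out : Bool) : Decidable (Spec_check row out) := by unfold Spec_check; infer_instance

-- ===== CLAIM (what is proved, stated in full; the proofs are below) =====
def Claim_equal_check : Prop := ∀ (row : List Int), Dom_check row → Pre_check row → Spec_check row (check row)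

-- ===== LEMMAS AND PROOFS =====

-- xs[0] (totalised with getD) is the head
lemma pyGet0_getD (l : List Int) : (PySem.List.pyGet? l 0).getD 0 = l.headD 0 := by
  cases l <;> simp [PySem.List.pyGet?, PySem.List.pyIdx?]

-- the run scan on a sorted list: part 1 / part 2 hold the distinct values with count 3 / 1
lemma run_decomp (a : Int) (t : List Int) (h : (a::t).Pairwise (· ≤ ·)) :
    (a ∉ t.dropWhile (fun x => x == a)) ∧
    ((t.dropWhile (fun x => x == a)).Pairwise (· ≤ ·)) ∧
    (a::t).count a = (t.takeWhile (fun x => x == a)).length + 1 ∧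
    (∀ v, v ≠ a → (a::t).count v = (t.dropWhile (fun x => x == a)).count v) := by
  obtain ⟨ha, ht⟩ := List.pairwise_cons.mp h
  have hgrp : ∀ x ∈ t.takeWhile (fun x => x == a), x = a := by
    intro x hx
    have := List.mem_takeWhile_imp (p := fun y => y == a) (l := t) hx
    exact eq_of_beq this
  have hsplit : t.takeWhile (fun x => x == a) ++ t.dropWhile (fun x => x == a) = t :=
    List.takeWhile_append_dropWhile
  have hrest_sorted : (t.dropWhile (fun x => x == a)).Pairwise (· ≤ ·) :=
    ht.sublist (List.dropWhile_sublist _)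
  have hrest_notmem : a ∉ t.dropWhile (fun x => x == a) := by
    cases hr : t.dropWhile (fun x => x == a) with
    | nil => simp
    | cons b r =>
      have hne : t.dropWhile (fun x => x == a) ≠ [] := by simp [hr]
      have hbne : b ≠ a := by
        have h1 : ((t.dropWhile (fun x => x == a)).head hne == a) = false :=
          List.head_dropWhile_not _ hne
        have h2 : (t.dropWhile (fun x => x == a)).head? = some b := by rw [hr]; rfl
        rw [List.head?_eq_some_head hne] at h2
        have h3 := Option.some.inj h2
        rw [h3] at h1; simpa using h1
      have hble : ∀ x ∈ r, b ≤ x := by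
        have := hrest_sorted; rw [hr] at this
        exact (List.pairwise_cons.mp this).1
      have hab : a < b := by
        have hbmem : b ∈ t := (List.dropWhile_sublist _).mem (by rw [hr]; exact List.mem_cons_self)
        exact lt_of_le_of_ne (ha b hbmem) (Ne.symm hbne)
      intro hmem
      rcases List.mem_cons.mp hmem with h1 | h1
      · exact hbne h1.symm
      · exact absurd (lt_of_lt_of_le hab (hble a h1)) (lt_irrefl a)
  refine ⟨hrest_notmem, hrest_sorted, ?_, ?_⟩
  · rw [List.count_cons_self]
    conv_lhs => rw [← hsplit]
    rw [List.count_append, List.count_eq_zero.mpr hrest_notmem,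
        List.count_eq_length.mpr (fun b hb => (hgrp b hb).symm)]
  · intro v hv
    rw [List.count_cons_of_ne (Ne.symm hv)]
    conv_lhs => rw [← hsplit]
    rw [List.count_append]
    have : (t.takeWhile (fun x => x == a)).count v = 0 := by
      apply List.count_eq_zero.mpr
      intro hmem; exact hv (hgrp v hmem)
    omega

lemma scanRuns_spec (s : List Int) (h : s.Pairwise (· ≤ ·)) :
    (∀ x, x ∈ (scanRuns s).1 ↔ x ∈ s ∧ s.count x = 3) ∧
    (∀ x, x ∈ (scanRuns s).2 ↔ x ∈ s ∧ s.count x = 1) ∧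
    (scanRuns s).1.Nodup := by
  induction s using scanRuns.induct with
  | case1 => simp [scanRuns]
  | case2 a t h1 h2 ih =>
    obtain ⟨hnot, hrs, hca, hcv⟩ := run_decomp a t h
    obtain ⟨ih1, ih2, ih3⟩ := ih hrs
    have h2' : (((t.takeWhile (fun x => x == a)).length + 1) == 3) = true := h2
    have hred : scanRuns (a :: t) =
        (a :: (scanRuns (t.dropWhile (fun x => x == a))).1,
         (scanRuns (t.dropWhile (fun x => x == a))).2) := by
      rw [scanRuns]; simp only [h2', if_true]
    have hkey : ∀ (k : Nat) x, k ≠ 0 → x ≠ a →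
        ((x ∈ t.dropWhile (fun x => x == a) ∧ (t.dropWhile (fun x => x == a)).count x = k) ↔
         (x ∈ (a :: t) ∧ (a :: t).count x = k)) := by
      intro k x hk hx
      constructor
      · rintro ⟨hm, hc⟩
        exact ⟨List.mem_cons_of_mem a ((List.dropWhile_sublist _).mem hm), by rw [hcv x hx, hc]⟩
      · rintro ⟨hm, hc⟩
        have hc' : (t.dropWhile (fun x => x == a)).count x = k := by rw [← hcv x hx, hc]
        refine ⟨List.count_pos_iff.mp ?_, hc'⟩
        rw [hc']; omega
    have hc3 : (a :: t).count a = 3 := by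
      rw [hca]; simpa using h2'
    refine ⟨?_, ?_, ?_⟩
    · intro x
      rw [hred]
      by_cases hx : x = a
      · subst hx
        constructor
        · intro _; exact ⟨List.mem_cons_self, hc3⟩
        · intro _; exact List.mem_cons_self
      · rw [List.mem_cons]
        constructor
        · rintro (h' | h')
          · exact absurd h' hx
          · exact (hkey 3 x (by omega) hx).mp ((ih1 x).mp h')
        · intro h'
          exact Or.inr ((ih1 x).mpr ((hkey 3 x (by omega) hx).mpr h'))
    · intro x
      rw [hred]
      by_cases hx : x = a
      · subst hx
        constructor
        · intro hmem
          exact absurd (List.count_pos_iff.mp (by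
            have hcnt := ((ih2 x).mp hmem).2; rw [hcnt]; omega)) hnot
        · rintro ⟨-, hc⟩
          rw [hc3] at hc; omega
      · rw [ih2 x]
        exact hkey 1 x (by omega) hx
    · rw [hred]
      refine List.nodup_cons.mpr ⟨?_, ih3⟩
      intro hmem
      exact hnot ((ih1 a).mp hmem).1
  | case3 a t h1 h2 h3 ih =>
    obtain ⟨hnot, hrs, hca, hcv⟩ := run_decomp a t h
    obtain ⟨ih1, ih2, ih3⟩ := ih hrs
    have h2' : (((t.takeWhile (fun x => x == a)).length + 1) == 3) = false :=
      Bool.not_eq_true _ ▸ h2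
    have h3' : (((t.takeWhile (fun x => x == a)).length + 1) == 1) = true := h3
    have hred : scanRuns (a :: t) =
        ((scanRuns (t.dropWhile (fun x => x == a))).1,
         a :: (scanRuns (t.dropWhile (fun x => x == a))).2) := by
      rw [scanRuns]; simp only [h2', h3', if_true, Bool.false_eq_true, if_false]
    have hkey : ∀ (k : Nat) x, k ≠ 0 → x ≠ a →
        ((x ∈ t.dropWhile (fun x => x == a) ∧ (t.dropWhile (fun x => x == a)).count x = k) ↔
         (x ∈ (a :: t) ∧ (a :: t).count x = k)) := by
      intro k x hk hx
      constructor
      · rintro ⟨hm, hc⟩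
        exact ⟨List.mem_cons_of_mem a ((List.dropWhile_sublist _).mem hm), by rw [hcv x hx, hc]⟩
      · rintro ⟨hm, hc⟩
        have hc' : (t.dropWhile (fun x => x == a)).count x = k := by rw [← hcv x hx, hc]
        refine ⟨List.count_pos_iff.mp ?_, hc'⟩
        rw [hc']; omega
    have hc1 : (a :: t).count a = 1 := by
      rw [hca]; simpa using h3'
    refine ⟨?_, ?_, ?_⟩
    · intro x
      rw [hred]
      by_cases hx : x = a
      · subst hx
        constructor
        · intro hmem
          exact absurd (List.count_pos_iff.mp (by
            have hcnt := ((ih1 x).mp hmem).2; rw [hcnt]; omega)) hnot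
        · rintro ⟨-, hc⟩
          rw [hc1] at hc; omega
      · rw [ih1 x]
        exact hkey 3 x (by omega) hx
    · intro x
      rw [hred]
      by_cases hx : x = a
      · subst hx
        constructor
        · intro _; exact ⟨List.mem_cons_self, hc1⟩
        · intro _; exact List.mem_cons_self
      · rw [List.mem_cons]
        constructor
        · rintro (h' | h')
          · exact absurd h' hx
          · exact (hkey 1 x (by omega) hx).mp ((ih2 x).mp h')
        · intro h'
          exact Or.inr ((ih2 x).mpr ((hkey 1 x (by omega) hx).mpr h'))
    · rw [hred]; exact ih3
  | case4 a t h1 h2 h3 ih =>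
    obtain ⟨hnot, hrs, hca, hcv⟩ := run_decomp a t h
    obtain ⟨ih1, ih2, ih3⟩ := ih hrs
    have h2' : (((t.takeWhile (fun x => x == a)).length + 1) == 3) = false :=
      Bool.not_eq_true _ ▸ h2
    have h3' : (((t.takeWhile (fun x => x == a)).length + 1) == 1) = false :=
      Bool.not_eq_true _ ▸ h3
    have hred : scanRuns (a :: t) = scanRuns (t.dropWhile (fun x => x == a)) := by
      rw [scanRuns]; simp only [h2', h3', Bool.false_eq_true, if_false]
    have hkey : ∀ (k : Nat) x, k ≠ 0 → x ≠ a →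
        ((x ∈ t.dropWhile (fun x => x == a) ∧ (t.dropWhile (fun x => x == a)).count x = k) ↔
         (x ∈ (a :: t) ∧ (a :: t).count x = k)) := by
      intro k x hk hx
      constructor
      · rintro ⟨hm, hc⟩
        exact ⟨List.mem_cons_of_mem a ((List.dropWhile_sublist _).mem hm), by rw [hcv x hx, hc]⟩
      · rintro ⟨hm, hc⟩
        have hc' : (t.dropWhile (fun x => x == a)).count x = k := by rw [← hcv x hx, hc]
        refine ⟨List.count_pos_iff.mp ?_, hc'⟩
        rw [hc']; omega
    have hcnotsome : (a :: t).count a ≠ 3 ∧ (a :: t).count a ≠ 1 := by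
      rw [hca]
      constructor
      · intro hc; rw [hc] at h2'; simp at h2'
      · intro hc; rw [hc] at h3'; simp at h3'
    refine ⟨?_, ?_, ?_⟩
    · intro x
      rw [hred]
      by_cases hx : x = a
      · subst hx
        constructor
        · intro hmem
          exact absurd (List.count_pos_iff.mp (by
            have hcnt := ((ih1 x).mp hmem).2; rw [hcnt]; omega)) hnot
        · rintro ⟨-, hc⟩
          exact absurd hc hcnotsome.1
      · rw [ih1 x]
        exact hkey 3 x (by omega) hx
    · intro x
      rw [hred]
      by_cases hx : x = a
      · subst hx
        constructor
        · intro hmem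
          exact absurd (List.count_pos_iff.mp (by
            have hcnt := ((ih2 x).mp hmem).2; rw [hcnt]; omega)) hnot
        · rintro ⟨-, hc⟩
          exact absurd hc hcnotsome.2
      · rw [ih2 x]
        exact hkey 1 x (by omega) hx
    · rw [hred]; exact ih3

-- List.find? returns the head of the filter
lemma find?_eq_head?_filter (p : Int → Bool) (l : List Int) :
    l.find? p = (l.filter p).head? := by
  induction l with
  | nil => rfl
  | cons a t ih =>
    rw [List.find?_cons, List.filter_cons]
    cases h : p a
    · exact ih
    · rfl

lemma length_filter_eq_sum (l : List Int) (p : Int → Bool) :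
    (l.filter p).length = ∑ v ∈ l.toFinset, if p v then l.count v else 0 := by
  classical
  have key : ∑ v ∈ (l.filter p).toFinset, (l.filter p).count v = (l.filter p).length := by
    simpa using Multiset.toFinset_sum_count_eq (↑(l.filter p) : Multiset Int)
  rw [← key]
  have step : ∑ v ∈ (l.filter p).toFinset, (l.filter p).count v
      = ∑ v ∈ (l.filter p).toFinset, if p v then l.count v else 0 := by
    apply Finset.sum_congr rfl
    intro v hv
    have hp : p v = true := (List.mem_filter.mp (List.mem_toFinset.mp hv)).2
    rw [List.count_filter hp, if_pos hp]
  rw [step]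
  apply Finset.sum_subset
  · intro v hv
    exact List.mem_toFinset.mpr (List.mem_filter.mp (List.mem_toFinset.mp hv)).1
  · intro v hv hnv
    rw [if_neg]
    intro hp
    exact hnv (List.mem_toFinset.mpr (List.mem_filter.mpr ⟨List.mem_toFinset.mp hv, hp⟩))

-- the Int-valued count test of the ports, as a Nat count test
lemma cast3f (row : List Int) :
    row.filter (fun v => PySem.List.count row v == 3) =
    row.filter (fun v => row.count v == 3) := by
  apply List.filter_congr
  intro x _
  rw [PySem.List.count_eq]

lemma cast1f (row : List Int) :
    row.filter (fun v => PySem.List.count row v == 1) =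
    row.filter (fun v => row.count v == 1) := by
  apply List.filter_congr
  intro x _
  rw [PySem.List.count_eq]

-- A's loop result, as two filters of the row
lemma check_eq_filters (row : List Int) :
    check row =
      (((row.filter (fun v => row.count v == 3)).length == 3) &&
       (PySem.Int.mod ((row.filter (fun v => row.count v == 3)).headD 0) 2 == 1) &&
       (PySem.Int.mod ((row.filter (fun v => row.count v == 1)).headD 0) 2 == 0)) := by
  rw [check]
  rw [PySem.List.foldl_prod_mk
        (f := fun acc num => if PySem.List.count row num == 3 then acc ++ [num] else acc)
        (g := fun acc num => if PySem.List.count row num == 1 then acc ++ [num] else acc),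
      PySem.List.foldl_append_if_eq_filter, PySem.List.foldl_append_if_eq_filter]
  simp only [List.nil_append, pyGet0_getD]
  rw [cast3f row, cast1f row]

-- ===== VERDICT (by name: the statement is the Claim_ definition above) =====
theorem check_spec : Claim_equal_check := by
  intro row _ hpre
  unfold Spec_check
  show check row = check_alt row
  rw [check_eq_filters, check_alt]
  have hsort : (PySem.List.sorted row (fun x => x) false).Pairwise (· ≤ ·) := by
    simpa using PySem.List.sorted_pairwise row (fun x => x)
  have hperm : (PySem.List.sorted row (fun x => x) false).Perm row :=
    PySem.List.sorted_perm row (fun x => x) false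
  obtain ⟨sp1, sp2, spnd⟩ := scanRuns_spec _ hsort
  set s := PySem.List.sorted row (fun x => x) false with hs
  set T := (scanRuns s).1 with hT
  set S := (scanRuns s).2 with hS
  -- membership transferred to the row
  have hmemT : ∀ x, x ∈ T ↔ x ∈ row ∧ row.count x = 3 := by
    intro x; rw [sp1 x, hperm.mem_iff, hperm.count_eq]
  have hmemS : ∀ x, x ∈ S ↔ x ∈ row ∧ row.count x = 1 := by
    intro x; rw [sp2 x, hperm.mem_iff, hperm.count_eq]
  -- length of A's povtor = 3 * length of B's triples
  have hTfin : T.toFinset = row.toFinset.filter (fun v => row.count v = 3) := by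
    ext v
    simp only [List.mem_toFinset, Finset.mem_filter, hmemT v]
  have hTlen : T.length = (row.toFinset.filter (fun v => row.count v = 3)).card := by
    rw [← List.toFinset_card_of_nodup spnd, hTfin]
  have hP3 : (row.filter (fun v => row.count v == 3)).length = 3 * T.length := by
    rw [length_filter_eq_sum, hTlen, Finset.card_filter, Finset.mul_sum]
    apply Finset.sum_congr rfl
    intro v _
    by_cases h : row.count v = 3
    · simp [h]
    · simp [h]
  by_cases hT1 : T.length = 1
  · -- exactly one triple value v
    obtain ⟨v, hTv⟩ := List.length_eq_one_iff.mp hT1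
    have hv : v ∈ row ∧ row.count v = 3 := (hmemT v).mp (by rw [hTv]; exact List.mem_cons_self)
    have hP3len : (row.filter (fun v => row.count v == 3)).length = 3 := by
      rw [hP3, hT1]
    -- A's povtor is nonempty and its head is v
    have hP3head : (row.filter (fun v => row.count v == 3)).headD 0 = v := by
      cases hP : row.filter (fun v => row.count v == 3) with
      | nil => rw [hP] at hP3len; simp at hP3len
      | cons w r =>
        have hw : w ∈ row.filter (fun v => row.count v == 3) := by
          rw [hP]; exact List.mem_cons_self
        have hw' : w ∈ row ∧ row.count w = 3 := by
          have := List.mem_filter.mp hw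
          exact ⟨this.1, by simpa using this.2⟩
        have : w ∈ T := (hmemT w).mpr hw'
        rw [hTv] at this
        simp only [List.mem_singleton] at this
        simpa using this
    have hThead : T.headD 0 = v := by rw [hTv]; rfl
    by_cases hodd : PySem.Int.mod v 2 = 1
    · -- odd triple: both sides reduce to the parity of the first unique value
      have hfind : row.find? (fun x => S.contains x) =
          (row.filter (fun v => row.count v == 1)).head? := by
        rw [find?_eq_head?_filter]
        congr 1
        apply List.filter_congr
        intro x hx
        by_cases h1 : row.count x = 1
        · simp [(hmemS x).mpr ⟨hx, h1⟩, h1]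
        · have : x ∉ S := fun hmem => h1 ((hmemS x).mp hmem).2
          simp [this, h1]
      -- Pre_check rules out the IndexError case: some element has count 1
      have hP1ne : row.filter (fun v => row.count v == 1) ≠ [] := by
        intro hnil
        apply hpre
        refine ⟨?_, ?_, ?_⟩
        · rw [cast3f row]
          exact hP3len
        · rw [cast3f row, hP3head, hodd]
        · rw [List.all_eq_true]
          intro x hx
          have : row.count x ≠ 1 := by
            intro hc
            have : x ∈ row.filter (fun v => row.count v == 1) :=
              List.mem_filter.mpr ⟨hx, by simp [hc]⟩
            rw [hnil] at this
            exact absurd this (List.not_mem_nil)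
          rw [PySem.List.count_eq]
          simpa using fun h => this (by exact_mod_cast h)
      cases hP1 : row.filter (fun v => row.count v == 1) with
      | nil => exact absurd hP1 hP1ne
      | cons w r =>
        rw [hfind, hP1, hP3len, hP3head, hThead, hT1]
        have hb : (PySem.Int.mod v 2 == 1) = true := by rw [hodd]; rfl
        simp only [hb, List.head?_cons, List.headD_cons]
        simp
    · -- even (or other) triple value: both sides are false
      rw [hP3len, hP3head, hThead, hT1]
      have hb : (PySem.Int.mod v 2 == 1) = false := beq_eq_false_iff_ne.mpr hodd
      simp only [hb]
      simp
  · -- no or several triple values: both sides are false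
    have h3 : ((row.filter (fun v => row.count v == 3)).length == 3) = false := by
      rw [hP3]; simp; omega
    have hc : (T.length == 1) = false := by simp [hT1]
    simp [h3, hc]
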